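-- pv_equiv track=rewrite | github.com/nzitonda3/passwordC-Dtool | pcfg_utils.py | identify_pattern_and_groups
-- ===== SOURCE A (Python) =====
-- def identify_pattern_and_groups(password):
--     """
--     Identify character type groups in password.
--     Returns pattern like "L3D2S1" and groups.
--     """
--     groups = []
--     cur = None
--     cnt = 0
--
--     for ch in password:
--         if ch.islower():
--             cls = 'L'
--         elif ch.isupper():
--             cls = 'U'
--         elif ch.isdigit():
--             cls = 'D'
--         else:
--             cls = 'S'
--
--         if cls == cur:
--             cnt += 1
--         else:
--             if cur is not None:
--                 groups.append((cur, cnt))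
--             cur = cls
--             cnt = 1
--
--     if cur is not None:
--         groups.append((cur, cnt))
--
--     pattern = ''.join([f"{g[0]}{g[1]}" for g in groups])
--     return pattern, groups
-- ===== SOURCE B (Python) =====
-- def identify_pattern_and_groups(password):
--     """
--     Identify character type groups in password.
--     Returns pattern like "L3D2S1" and groups.
--     """
--     # Phase 1: classify every character.
--     classes = ['L' if ch.islower() else
--                'U' if ch.isupper() else
--                'D' if ch.isdigit() else 'S'
--                for ch in password]
--     # Phase 2: collapse runs by scanning ahead to each run's end.
--     groups = []
--     i, n = 0, len(classes)
--     while i < n: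
--         j = i + 1
--         while j < n and classes[j] == classes[i]:
--             j += 1
--         groups.append((classes[i], j - i))
--         i = j
--     pattern = ''.join(f"{c}{k}" for c, k in groups)
--     return pattern, groups
-- ===== Notes on version B (the rewrite author's own statement) =====
-- stated objective: alternative
-- what changed: A's single-pass state machine (cur/cnt accumulator flushed on class change) is replaced by a two-phase map-then-group: first classify every character into a class list, then collapse runs by scanning ahead to each run's end with an index jump.
import Mathlib
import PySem

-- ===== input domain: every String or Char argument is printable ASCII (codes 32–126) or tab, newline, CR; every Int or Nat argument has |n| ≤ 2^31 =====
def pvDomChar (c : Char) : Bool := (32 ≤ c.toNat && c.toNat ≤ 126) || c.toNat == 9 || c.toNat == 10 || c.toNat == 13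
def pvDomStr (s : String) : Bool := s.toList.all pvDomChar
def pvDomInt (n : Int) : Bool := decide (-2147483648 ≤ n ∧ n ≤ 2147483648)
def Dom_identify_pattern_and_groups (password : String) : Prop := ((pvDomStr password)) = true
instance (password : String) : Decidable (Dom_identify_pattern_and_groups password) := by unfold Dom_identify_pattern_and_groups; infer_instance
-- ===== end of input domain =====

-- B replaces A's cur/cnt state machine by a two-phase map-then-group pass; same result, same O(n) cost.

-- ===== PORT A =====
-- the loop: state is (groups, cur : Option String, cnt)
def pvStepA (st : List (String × Int) × Option String × Int) (ch : Char) :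
    List (String × Int) × Option String × Int :=
  let cls : String :=
    if PySem.Chars.islower ch then "L"
    else if PySem.Chars.isupper ch then "U"
    else if PySem.Chars.isdigit ch then "D"
    else "S"
  match st with
  | (groups, cur, cnt) =>
    if some cls == cur then (groups, cur, cnt + 1)
    else
      ((match cur with
        | some c => groups ++ [(c, cnt)]
        | none => groups), some cls, 1)

def identify_pattern_and_groups (password : String) : String × (List (String × Int)) :=
  match password.toList.foldl pvStepA ([], none, 0) with
  | (groups, cur, cnt) =>
    let groups :=
      match cur with
      | some c => groups ++ [(c, cnt)]
      | none => groups
    (PySem.Str.join "" (groups.map fun g => g.1 ++ PySem.Int.toStr g.2), groups)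

-- ===== PORT B =====
def pvClassify (ch : Char) : String :=
  if PySem.Chars.islower ch then "L"
  else if PySem.Chars.isupper ch then "U"
  else if PySem.Chars.isdigit ch then "D"
  else "S"

-- phase 2 of Source B: the index j scans to the end of the current run (the equal
-- classes right after position i), the run is emitted, i jumps to j
def pvRle : List String → List (String × Int)
  | [] => []
  | c :: rest =>
    let run := rest.takeWhile (· == c)
    (c, 1 + (run.length : Int)) :: pvRle (rest.drop run.length)
termination_by cs => cs.length
decreasing_by
  simp only [List.length_drop, List.length_cons]
  omega

def identify_pattern_and_groups_alt (password : String) : String × (List (String × Int)) :=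
  let classes := password.toList.map pvClassify
  let groups := pvRle classes
  (PySem.Str.join "" (groups.map fun g => g.1 ++ PySem.Int.toStr g.2), groups)

-- ===== PRECONDITION & SPEC =====
def Spec_identify_pattern_and_groups (password : String) (out : String × (List (String × Int))) : Prop := out = identify_pattern_and_groups_alt password
instance (password : String) (out : String × (List (String × Int))) : Decidable (Spec_identify_pattern_and_groups password out) := by unfold Spec_identify_pattern_and_groups; infer_instance

-- ===== CLAIM (what is proved, stated in full; the proofs are below) =====
def Claim_equal_identify_pattern_and_groups : Prop := ∀ (password : String), Dom_identify_pattern_and_groups password → Spec_identify_pattern_and_groups password (identify_pattern_and_groups password)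

-- ===== LEMMAS AND PROOFS =====

-- A's loop step, seen on the class (after pvClassify)
def pvStepC (st : List (String × Int) × Option String × Int) (cls : String) :
    List (String × Int) × Option String × Int :=
  match st with
  | (groups, cur, cnt) =>
    if some cls == cur then (groups, cur, cnt + 1)
    else
      ((match cur with
        | some c => groups ++ [(c, cnt)]
        | none => groups), some cls, 1)

-- reference run-length encoder with an open first run (c, cnt)
def pvRleFrom (c : String) (cnt : Int) : List String → List (String × Int)
  | [] => [(c, cnt)]
  | d :: rest => if d == c then pvRleFrom c (cnt + 1) rest else (c, cnt) :: pvRleFrom d 1 rest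

def pvFinish (st : List (String × Int) × Option String × Int) : List (String × Int) :=
  match st with
  | (g, some x, k) => g ++ [(x, k)]
  | (g, none, _) => g

lemma pvFoldC (cs : List String) :
    ∀ (groups : List (String × Int)) (c : String) (cnt : Int),
      pvFinish (cs.foldl pvStepC (groups, some c, cnt)) = groups ++ pvRleFrom c cnt cs := by
  induction cs with
  | nil => intro groups c cnt; simp [pvFinish, pvRleFrom]
  | cons d rest ih =>
    intro groups c cnt
    by_cases h : d = c
    · subst h
      simp only [List.foldl_cons, pvStepC, beq_self_eq_true, pvRleFrom, if_true]
      exact ih groups d (cnt + 1)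
    · have hbeq : (some d == some c) = false := by simp [h]
      have hbeq2 : (d == c) = false := by simp [h]
      simp only [List.foldl_cons, pvStepC, hbeq, Bool.false_eq_true, if_false, pvRleFrom,
        hbeq2]
      rw [ih (groups ++ [(c, cnt)]) d 1]
      simp

lemma pvRleFrom_eq (cs : List String) :
    ∀ (c : String) (cnt : Int),
      pvRleFrom c cnt cs =
        (c, cnt + ((cs.takeWhile (· == c)).length : Int)) ::
          pvRle (cs.drop (cs.takeWhile (· == c)).length) := by
  induction cs with
  | nil => intro c cnt; simp [pvRleFrom, pvRle]
  | cons d rest ih =>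
    intro c cnt
    by_cases h : d = c
    · subst h
      rw [show pvRleFrom d cnt (d :: rest) = pvRleFrom d (cnt + 1) rest from by
        simp [pvRleFrom]]
      rw [ih d (cnt + 1)]
      simp only [List.takeWhile_cons, beq_self_eq_true, if_true, List.length_cons,
        List.drop_succ_cons]
      push_cast
      ring_nf
    · have hbeq : (d == c) = false := by simp [h]
      rw [show pvRleFrom c cnt (d :: rest) = (c, cnt) :: pvRleFrom d 1 rest from by
        simp [pvRleFrom, hbeq]]
      rw [ih d 1]
      simp only [List.takeWhile_cons, hbeq, Bool.false_eq_true, if_false,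
        List.length_nil, List.drop_zero, pvRle]
      norm_num

lemma pvGroups_eq (cs : List Char) :
    pvFinish (cs.foldl pvStepA ([], none, 0)) = pvRle (cs.map pvClassify) := by
  have hmap : cs.foldl pvStepA ([], none, 0) =
      (cs.map pvClassify).foldl pvStepC ([], none, 0) := by
    rw [List.foldl_map]
    rfl
  rw [hmap]
  cases hm : cs.map pvClassify with
  | nil => simp [pvRle, pvFinish]
  | cons c rest =>
    have h1 : pvStepC (([] : List (String × Int)), none, (0 : Int)) c =
        ([], some c, 1) := by
      simp [pvStepC]
    simp only [List.foldl_cons, h1]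
    rw [pvFoldC rest [] c 1]
    rw [pvRleFrom_eq rest c 1]
    simp [pvRle]

-- ===== VERDICT (by name: the statement is the Claim_ definition above) =====
theorem identify_pattern_and_groups_spec : Claim_equal_identify_pattern_and_groups := by
  intro password _
  unfold Spec_identify_pattern_and_groups identify_pattern_and_groups identify_pattern_and_groups_alt
  have h := pvGroups_eq password.toList
  rcases hf : password.toList.foldl pvStepA ([], none, 0) with ⟨g, cur, k⟩
  rw [hf] at h
  cases cur <;> simp_all [pvFinish]
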